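-- pv_equiv track=rewrite | github.com/Algos-ICT/lab-2_1-nikita-kuznetsov | task5.py | max_prize_amount
-- ===== SOURCE A (Python) =====
-- def max_prize_amount(candies: int) -> tuple[int, list[int]]:
--
--     if candies < 2:
--         return 1, [candies]
--
--     candy_per_child = [1]
--     candies -= 1
--
--     while candies > candy_per_child[-1]:
--         new_candies = candy_per_child[-1] + 1
--         candy_per_child.append(new_candies)
--         candies -= new_candies
--
--     candy_per_child[-1] += candies
--
--     return len(candy_per_child), candy_per_child
-- ===== SOURCE B (Python) =====
-- def max_prize_amount(candies: int) -> tuple[int, list[int]]: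
--     # Closed-form-count version: binary-search the largest k with k(k+1)//2 <= candies,
--     # then build the list directly; O(log n) instead of A's O(sqrt n) greedy loop.
--     if candies < 2:
--         return 1, [candies]
--     lo, hi = 1, candies
--     while lo + 1 < hi:
--         mid = (lo + hi) // 2
--         if mid * (mid + 1) // 2 <= candies:
--             lo = mid
--         else:
--             hi = mid
--     k = lo
--     return k, list(range(1, k)) + [candies - k * (k - 1) // 2]
-- ===== Notes on version B (the rewrite author's own statement) =====
-- stated objective: alternative
-- what changed: Replaces A's greedy loop that repeatedly appends the next child's candy count to a growing list while subtracting it from the remainder by a binary search for the largest k whose triangular number fits in candies, then builds the range list plus a closed-form last element in one step.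
import Mathlib
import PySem

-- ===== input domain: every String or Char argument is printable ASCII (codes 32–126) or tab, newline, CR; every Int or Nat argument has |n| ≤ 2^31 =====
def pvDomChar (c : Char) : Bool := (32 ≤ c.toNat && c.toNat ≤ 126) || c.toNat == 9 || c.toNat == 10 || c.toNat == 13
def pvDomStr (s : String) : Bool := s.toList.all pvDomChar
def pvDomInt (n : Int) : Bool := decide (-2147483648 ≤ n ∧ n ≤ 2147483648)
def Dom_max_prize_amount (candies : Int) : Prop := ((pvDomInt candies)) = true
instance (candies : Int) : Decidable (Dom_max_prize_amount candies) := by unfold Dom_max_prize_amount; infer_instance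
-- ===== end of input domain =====

-- B replaces A's greedy list-building subtraction loop by a binary search for the
-- largest k with k(k+1)//2 <= candies plus a direct range construction (objective: alternative).

-- ===== PORT A =====
-- while candies > candy_per_child[-1]: append last+1, subtract it.
-- The '0 ≤ last' conjunct is a totality guard only (the list starts at [1] and grows).
def pvALoop (lst : List Int) (c : Int) : List Int × Int :=
  if h : PySem.List.pyGetD lst (-1) 0 < c ∧ 0 ≤ PySem.List.pyGetD lst (-1) 0 then
    pvALoop (lst ++ [PySem.List.pyGetD lst (-1) 0 + 1]) (c - (PySem.List.pyGetD lst (-1) 0 + 1))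
  else (lst, c)
termination_by c.toNat
decreasing_by omega

def max_prize_amount (candies : Int) : Int × List Int :=
  if candies < 2 then (1, [candies])
  else
    let p := pvALoop [1] (candies - 1)
    -- candy_per_child[-1] += candies
    let lst := p.1.dropLast ++ [PySem.List.pyGetD p.1 (-1) 0 + p.2]
    ((lst.length : Int), lst)

-- ===== PORT B =====
-- binary search: largest k ≥ 1 with k*(k+1)//2 ≤ candies (invariant T(lo) ≤ candies < T(hi))
def pvBLoop (candies lo hi : Int) : Int :=
  if h : lo + 1 < hi then
    let mid := PySem.Int.floordiv (lo + hi) 2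
    if PySem.Int.floordiv (mid * (mid + 1)) 2 ≤ candies then pvBLoop candies mid hi
    else pvBLoop candies lo mid
  else lo
termination_by (hi - lo).toNat
decreasing_by
  all_goals
    simp only [PySem.Int.floordiv_eq_ediv_of_pos (by norm_num : (0:Int) < 2)]
    omega

def max_prize_amount_alt (candies : Int) : Int × List Int :=
  if candies < 2 then (1, [candies])
  else
    let k := pvBLoop candies 1 candies
    (k, PySem.List.pyRange 1 k 1 ++ [candies - PySem.Int.floordiv (k * (k - 1)) 2])

-- ===== PRECONDITION & SPEC =====
def Spec_max_prize_amount (candies : Int) (out : Int × List Int) : Prop := out = max_prize_amount_alt candies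
instance (candies : Int) (out : Int × List Int) : Decidable (Spec_max_prize_amount candies out) := by unfold Spec_max_prize_amount; infer_instance

-- ===== CLAIM (what is proved, stated in full; the proofs are below) =====
def Claim_equal_max_prize_amount : Prop := ∀ (candies : Int), Dom_max_prize_amount candies → Spec_max_prize_amount candies (max_prize_amount candies)

-- ===== LEMMAS AND PROOFS =====

-- [1, 2, …, j] as built by both programs
def pvR1 (j : Int) : List Int := PySem.List.pyRange 1 (j + 1) 1

lemma pvR1_one : pvR1 1 = [1] := by decide

lemma pvR1_snoc (j : Int) (hj : 1 ≤ j) : pvR1 j = pvR1 (j - 1) ++ [j] := by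
  simp only [pvR1, PySem.List.pyRange_one]
  have h1 : (j + 1 - 1).toNat = (j - 1 + 1 - 1).toNat + 1 := by omega
  rw [h1, List.range_succ, List.map_append]
  simp
  omega

lemma pvR1_last (j : Int) (hj : 1 ≤ j) : PySem.List.pyGetD (pvR1 j) (-1) 0 = j := by
  rw [pvR1_snoc j hj, PySem.List.pyGetD_neg_one_append_singleton]

lemma pvR1_append (j : Int) (hj : 1 ≤ j) : pvR1 j ++ [j + 1] = pvR1 (j + 1) := by
  rw [pvR1_snoc (j + 1) (by omega)]
  simp

lemma pvR1_len (j : Int) (hj : 0 ≤ j) : ((pvR1 j).length : Int) = j := by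
  simp only [pvR1, PySem.List.pyRange_one, List.length_map, List.length_range]
  omega

-- A's loop reaches [1..k] with leftover rf, conserving the total (doubled to stay linear)
lemma pvALoop_spec : ∀ (n : Nat) (j r : Int), r.toNat = n → 1 ≤ j → 0 ≤ r →
    ∃ k rf, pvALoop (pvR1 j) r = (pvR1 k, rf) ∧ 1 ≤ k ∧ 0 ≤ rf ∧ rf ≤ k ∧
      k * (k + 1) + 2 * rf = j * (j + 1) + 2 * r := by
  intro n
  induction n using Nat.strong_induction_on with
  | _ n ih =>
    intro j r hn hj hr
    rw [pvALoop]
    rw [pvR1_last j hj]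
    by_cases hc : j < r
    · rw [dif_pos ⟨hc, by omega⟩]
      rw [pvR1_append j hj]
      obtain ⟨k, rf, heq, hk, hrf0, hrfk, hsum⟩ :=
        ih (r - (j + 1)).toNat (by omega) (j + 1) (r - (j + 1)) rfl (by omega) (by omega)
      refine ⟨k, rf, heq, hk, hrf0, hrfk, ?_⟩
      have : (j + 1) * (j + 1 + 1) + 2 * (r - (j + 1)) = j * (j + 1) + 2 * r := by ring
      omega
    · rw [dif_neg (by omega)]
      exact ⟨j, r, rfl, hj, hr, by omega, by ring⟩

-- B's binary search keeps T(lo) ≤ candies < T(hi) and lands on the unique k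
lemma pvBLoop_spec : ∀ (n : Nat) (c lo hi : Int), (hi - lo).toNat = n → 1 ≤ lo → lo < hi →
    lo * (lo + 1) ≤ 2 * c → 2 * c < hi * (hi + 1) →
    1 ≤ pvBLoop c lo hi ∧ pvBLoop c lo hi * (pvBLoop c lo hi + 1) ≤ 2 * c ∧
      2 * c < (pvBLoop c lo hi + 1) * (pvBLoop c lo hi + 2) := by
  intro n
  induction n using Nat.strong_induction_on with
  | _ n ih =>
    intro c lo hi hn hlo hlh hT1 hT2
    rw [pvBLoop]
    by_cases hmid : lo + 1 < hi
    · rw [dif_pos hmid]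
      have hfd : PySem.Int.floordiv (lo + hi) 2 = (lo + hi) / 2 :=
        PySem.Int.floordiv_eq_ediv_of_pos (by norm_num)
      set mid := PySem.Int.floordiv (lo + hi) 2 with hmiddef
      have hb1 : lo < mid := by omega
      have hb2 : mid < hi := by omega
      have heven : 2 ∣ mid * (mid + 1) := (Int.even_mul_succ_self mid).two_dvd
      have hfd2 : PySem.Int.floordiv (mid * (mid + 1)) 2 = mid * (mid + 1) / 2 :=
        PySem.Int.floordiv_eq_ediv_of_pos (by norm_num)
      by_cases hle : PySem.Int.floordiv (mid * (mid + 1)) 2 ≤ c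
      · rw [if_pos hle]
        exact ih (hi - mid).toNat (by omega) c mid hi rfl (by omega) hb2 (by omega) hT2
      · rw [if_neg hle]
        exact ih (mid - lo).toNat (by omega) c lo mid rfl hlo hb1 hT1 (by omega)
    · rw [dif_neg hmid]
      have : hi = lo + 1 := by omega
      refine ⟨hlo, hT1, ?_⟩
      calc 2 * c < hi * (hi + 1) := hT2
        _ = (lo + 1) * (lo + 2) := by rw [this]; ring

-- the k with T(k) ≤ c < T(k+1) is unique among k ≥ 1
lemma pv_k_unique (k k' c : Int) (hk : 1 ≤ k) (hk' : 1 ≤ k')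
    (h1 : k * (k + 1) ≤ 2 * c) (h2 : 2 * c < (k + 1) * (k + 2))
    (h1' : k' * (k' + 1) ≤ 2 * c) (h2' : 2 * c < (k' + 1) * (k' + 2)) : k = k' := by
  rcases lt_trichotomy k k' with h | h | h
  · exfalso; nlinarith
  · exact h
  · exfalso; nlinarith

-- ===== VERDICT (by name: the statement is the Claim_ definition above) =====
theorem max_prize_amount_spec : Claim_equal_max_prize_amount := by
  intro candies _
  unfold Spec_max_prize_amount max_prize_amount max_prize_amount_alt
  by_cases hs : candies < 2
  · rw [if_pos hs, if_pos hs]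
  · rw [if_neg hs, if_neg hs]
    have hc2 : 2 ≤ candies := by omega
    -- A side
    obtain ⟨k, rf, heq, hk, hrf0, hrfk, hsum⟩ :=
      pvALoop_spec (candies - 1).toNat 1 (candies - 1) rfl le_rfl (by omega)
    rw [pvR1_one] at heq
    -- B side
    obtain ⟨hk'1, hk'2, hk'3⟩ :=
      pvBLoop_spec (candies - 1).toNat candies 1 candies rfl le_rfl (by omega)
        (by omega) (by nlinarith)
    set k' := pvBLoop candies 1 candies with hk'def
    have hkk' : k = k' := pv_k_unique k k' candies hk hk'1 (by omega) (by nlinarith) hk'2 hk'3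
    simp only [heq]
    rw [pvR1_last k hk, pvR1_snoc k hk, List.dropLast_concat]
    have heven : 2 ∣ k' * (k' - 1) := by
      have h := (Int.even_mul_succ_self (k' - 1)).two_dvd
      have e : (k' - 1) * (k' - 1 + 1) = k' * (k' - 1) := by ring
      rwa [e] at h
    have hfd : PySem.Int.floordiv (k' * (k' - 1)) 2 = k' * (k' - 1) / 2 :=
      PySem.Int.floordiv_eq_ediv_of_pos (by norm_num)
    have hrem : candies - PySem.Int.floordiv (k' * (k' - 1)) 2 = k + rf := by
      rw [hfd]
      have hx : k' * (k' - 1) = k * (k + 1) - 2 * k := by rw [hkk']; ring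
      omega
    have hlist : pvR1 (k - 1) = PySem.List.pyRange 1 k' 1 := by
      rw [← hkk']; simp only [pvR1]; congr 1; ring
    rw [← hlist, hrem]
    refine Prod.ext ?_ rfl
    simp only [List.length_append, List.length_cons, List.length_nil]
    have := pvR1_len (k - 1) (by omega)
    push_cast
    omega
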